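-- pv_equiv track=rewrite | github.com/EliottPaq/chess-game | main file.py | diagonale_right
-- ===== SOURCE A (Python) =====
-- def diagonale_right (position:list):
--     """
--     creating the diagonale →↓ for the mouvement function
--     Args:
--         position (list): the position
--
--     Returns:
--         list: list of position which will be used for the mouvement function
--     """
--     plays = []
--     y = position[0]
--     x = position[1]
--     while x > 0 and y > 0 :
--         x -= 1
--         y -= 1
--         plays.append([y,x])
--     plays = list(reversed(plays)) # we are reversed because a wall can block us
--     y = position[0]
--     x = position[1]
--     while x < 7 and y < 7 :
--         x += 1
--         y += 1
--         plays.append([y,x])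
--     return plays
-- ===== SOURCE B (Python) =====
-- def diagonale_right(position: list):
--     y = position[0]
--     x = position[1]
--     left = max(0, min(y, x))
--     right = max(0, min(7 - y, 7 - x))
--     return [[y + i, x + i] for i in range(-left, right + 1) if i != 0]
-- ===== Notes on version B (the rewrite author's own statement) =====
-- stated objective: simpler
-- what changed: Replaces A's two while-loops and explicit list reversal by computing the two clamped diagonal arm lengths and emitting all squares with one range comprehension skipping offset 0.
-- outside the precondition, e.g. on diagonale_right([3]): A raises IndexError, B raises IndexError
import Mathlib
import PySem

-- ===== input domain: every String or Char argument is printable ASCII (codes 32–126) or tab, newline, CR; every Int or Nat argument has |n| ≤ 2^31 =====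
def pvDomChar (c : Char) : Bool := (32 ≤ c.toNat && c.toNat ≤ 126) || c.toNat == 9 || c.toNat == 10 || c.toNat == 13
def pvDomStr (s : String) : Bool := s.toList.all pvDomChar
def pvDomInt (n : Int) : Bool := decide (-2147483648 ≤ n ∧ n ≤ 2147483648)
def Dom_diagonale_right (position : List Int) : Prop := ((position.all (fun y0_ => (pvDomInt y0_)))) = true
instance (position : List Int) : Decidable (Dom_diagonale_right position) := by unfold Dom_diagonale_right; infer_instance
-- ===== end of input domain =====

-- B replaces A's two symmetric while-loops plus an explicit reversal by clamped arm
-- lengths and a single range comprehension (objective: simpler).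

-- ===== PORT A =====
-- first while-loop of A: walks up-left appending [y-1,x-1], … onto plays
def pvLoopDown (y x : Int) (plays : List (List Int)) : List (List Int) :=
  if 0 < x ∧ 0 < y then pvLoopDown (y - 1) (x - 1) (plays ++ [[y - 1, x - 1]]) else plays
termination_by (min x y).toNat
decreasing_by omega

-- second while-loop of A: walks down-right appending [y+1,x+1], …
def pvLoopUp (y x : Int) (plays : List (List Int)) : List (List Int) :=
  if x < 7 ∧ y < 7 then pvLoopUp (y + 1) (x + 1) (plays ++ [[y + 1, x + 1]]) else plays
termination_by (min (7 - x) (7 - y)).toNat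
decreasing_by omega

def diagonale_right (position : List Int) : List (List Int) :=
  match PySem.List.pyGet? position 0, PySem.List.pyGet? position 1 with
  | some y, some x => pvLoopUp y x ((pvLoopDown y x []).reverse)
  | _, _ => []   -- unreachable under Pre_ (Python raises IndexError)

-- ===== PORT B =====
def diagonale_right_alt (position : List Int) : List (List Int) :=
  match PySem.List.pyGet? position 0 with
  | none => []   -- unreachable under Pre_ (Python raises IndexError)
  | some y =>
    match PySem.List.pyGet? position 1 with
    | none => []   -- unreachable under Pre_
    | some x =>
      let left : Int := max 0 (min y x)
      let right : Int := max 0 (min (7 - y) (7 - x))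
      ((PySem.List.pyRange (-left) (right + 1) 1).filter (fun i => decide (i ≠ 0))).map
        (fun i => [y + i, x + i])

-- ===== PRECONDITION & SPEC =====
-- Pre_ excludes lists of fewer than two elements, on which A raises IndexError.
def Pre_diagonale_right (position : List Int) : Prop := 2 ≤ position.length
instance (position : List Int) : Decidable (Pre_diagonale_right position) := by
  unfold Pre_diagonale_right; infer_instance

def pvWitness_diagonale_right : List Int := [3, 5]

def Spec_diagonale_right (position : List Int) (out : List (List Int)) : Prop := out = diagonale_right_alt position
instance (position : List Int) (out : List (List Int)) : Decidable (Spec_diagonale_right position out) := by unfold Spec_diagonale_right; infer_instance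

-- ===== CLAIM (what is proved, stated in full; the proofs are below) =====
def Claim_equal_diagonale_right : Prop := ∀ (position : List Int), Dom_diagonale_right position → Pre_diagonale_right position → Spec_diagonale_right position (diagonale_right position)

-- ===== LEMMAS AND PROOFS =====

-- characterisation of A's first loop
theorem pvLoopDown_eq (n : Nat) : ∀ (y x : Int) (acc : List (List Int)),
    (min x y).toNat = n →
    pvLoopDown y x acc =
      acc ++ (List.range n).map (fun (k : Nat) => [y - 1 - (k : Int), x - 1 - (k : Int)]) := by
  induction n with
  | zero =>
    intro y x acc h
    rw [pvLoopDown]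
    have : ¬ (0 < x ∧ 0 < y) := by omega
    simp [this]
  | succ n ih =>
    intro y x acc h
    rw [pvLoopDown]
    have hc : 0 < x ∧ 0 < y := by omega
    rw [if_pos hc, ih (y - 1) (x - 1) _ (by omega)]
    rw [List.range_succ_eq_map, List.map_cons, List.map_map]
    have hmap : List.map (fun (k : Nat) => [y - 1 - 1 - (k : Int), x - 1 - 1 - (k : Int)]) (List.range n)
        = List.map ((fun (k : Nat) => [y - 1 - (k : Int), x - 1 - (k : Int)]) ∘ Nat.succ) (List.range n) := by
      apply List.map_congr_left
      intro k _
      simp only [Function.comp_apply, List.cons.injEq, and_true, Nat.cast_succ]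
      omega
    rw [hmap]
    simp [List.append_assoc]

-- characterisation of A's second loop
theorem pvLoopUp_eq (n : Nat) : ∀ (y x : Int) (acc : List (List Int)),
    (min (7 - x) (7 - y)).toNat = n →
    pvLoopUp y x acc =
      acc ++ (List.range n).map (fun (k : Nat) => [y + 1 + (k : Int), x + 1 + (k : Int)]) := by
  induction n with
  | zero =>
    intro y x acc h
    rw [pvLoopUp]
    have : ¬ (x < 7 ∧ y < 7) := by omega
    simp [this]
  | succ n ih =>
    intro y x acc h
    rw [pvLoopUp]
    have hc : x < 7 ∧ y < 7 := by omega
    rw [if_pos hc, ih (y + 1) (x + 1) _ (by omega)]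
    rw [List.range_succ_eq_map, List.map_cons, List.map_map]
    have hmap : List.map (fun (k : Nat) => [y + 1 + 1 + (k : Int), x + 1 + 1 + (k : Int)]) (List.range n)
        = List.map ((fun (k : Nat) => [y + 1 + (k : Int), x + 1 + (k : Int)]) ∘ Nat.succ) (List.range n) := by
      apply List.map_congr_left
      intro k _
      simp only [Function.comp_apply, List.cons.injEq, and_true, Nat.cast_succ]
      omega
    rw [hmap]
    simp [List.append_assoc]

-- the core pointwise equality, positions given directly
theorem pv_core (y x : Int) :
    pvLoopUp y x ((pvLoopDown y x []).reverse) =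
      ((PySem.List.pyRange (-(max 0 (min y x))) ((max 0 (min (7 - y) (7 - x))) + 1) 1).filter
          (fun i => decide (i ≠ 0))).map (fun i => [y + i, x + i]) := by
  set L : Int := max 0 (min y x) with hL
  set R : Int := max 0 (min (7 - y) (7 - x)) with hR
  have hL0 : 0 ≤ L := le_max_left _ _
  have hR0 : 0 ≤ R := le_max_left _ _
  -- split B's range at 0 and 1, drop the filtered-out 0
  have hz : PySem.List.pyRange 0 1 1 = [0] := by decide
  have hsplit : PySem.List.pyRange (-L) (R + 1) 1 =
      PySem.List.pyRange (-L) 0 1 ++ ([0] ++ PySem.List.pyRange 1 (R + 1) 1) := by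
    rw [PySem.List.pyRange_one_append (-L) 0 (R + 1) (by omega) (by omega),
        PySem.List.pyRange_one_append 0 1 (R + 1) (by omega) (by omega), hz]
  rw [hsplit]
  rw [List.filter_append, List.filter_append]
  have hneg : (PySem.List.pyRange (-L) 0 1).filter (fun i => decide (i ≠ 0)) =
      PySem.List.pyRange (-L) 0 1 := by
    apply List.filter_eq_self.2
    intro a ha
    rw [PySem.List.mem_pyRange_one] at ha
    simp; omega
  have hpos : (PySem.List.pyRange 1 (R + 1) 1).filter (fun i => decide (i ≠ 0)) =
      PySem.List.pyRange 1 (R + 1) 1 := by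
    apply List.filter_eq_self.2
    intro a ha
    rw [PySem.List.mem_pyRange_one] at ha
    simp; omega
  rw [hneg, hpos]
  simp only [List.filter_cons, List.filter_nil]
  norm_num
  -- A's second loop over the accumulator
  rw [pvLoopUp_eq ((min (7 - x) (7 - y)).toNat) y x _ rfl]
  congr 1
  · -- reversed first loop = map over the negative range
    rw [pvLoopDown_eq ((min x y).toNat) y x [] rfl]
    simp only [List.nil_append]
    have hrev : PySem.List.pyRange (-L) 0 1 = (PySem.List.pyRange (-1) (-L - 1) (-1)).reverse := by
      rw [PySem.List.pyRange_neg_one_eq_reverse]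
      norm_num
    rw [hrev, List.map_reverse]
    congr 1
    rw [PySem.List.pyRange_neg_one]
    rw [List.map_map]
    have hn : (-1 - (-L - 1)).toNat = (min x y).toNat := by omega
    rw [hn]
    apply List.map_congr_left
    intro k _
    simp [Function.comp]
    constructor <;> ring
  · rw [PySem.List.pyRange_one]
    rw [List.map_map]
    have hn : (R + 1 - 1).toNat = (min (7 - x) (7 - y)).toNat := by omega
    rw [hn]
    apply List.map_congr_left
    intro k _
    simp [Function.comp]
    constructor <;> ring

-- ===== VERDICT (by name: the statement is the Claim_ definition above) =====
theorem diagonale_right_spec : Claim_equal_diagonale_right := by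
  intro position _ hpre
  unfold Spec_diagonale_right diagonale_right diagonale_right_alt
  unfold Pre_diagonale_right at hpre
  obtain ⟨y, x, rest, rfl⟩ : ∃ y x rest, position = y :: x :: rest := by
    match position with
    | y :: x :: rest => exact ⟨y, x, rest, rfl⟩
    | [] => simp at hpre
    | [_] => simp at hpre
  have h0 : PySem.List.pyGet? (y :: x :: rest) 0 = some y := PySem.List.pyGet?_zero_cons y (x :: rest)
  have h1 : PySem.List.pyGet? (y :: x :: rest) 1 = some x := by
    rw [show (1 : Int) = ((0 : Nat) : Int) + 1 by norm_num, PySem.List.pyGet?_cons_succ]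
    exact PySem.List.pyGet?_zero_cons x rest
  rw [h0, h1]
  exact pv_core y x
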